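-- pv_equiv track=rewrite | github.com/alicjastendera/python_codewars | ThePoetAndThePendulum.py | pendulum
-- ===== SOURCE A (Python) =====
-- def pendulum(values):
--     lst = [None] * len(values)
--     values = sorted(values)
--
--     if len(values) % 2 == 1:
--         position =  int(len(values)/2) # start position
--     else:
--         position =  int(len(values)/2) -1
--
--     step = 1
--     v = 1
--
--     for i in values:
--         lst[position] = i
--         position = position + step
--         v = v * -1
--         step = v * (abs(step) + 1)
--
--     return lst
-- ===== SOURCE B (Python) =====
-- def pendulum(values):
--     # Partition the sorted values by parity of their sorted position:
--     # even positions fan out leftward (so the left half is reversed at the end),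
--     # odd positions fan out rightward in order.
--     left = []
--     right = []
--     for k, x in enumerate(sorted(values)):
--         if k % 2 == 0:
--             left.append(x)
--         else:
--             right.append(x)
--     return left[::-1] + right
-- ===== Notes on version B (the rewrite author's own statement) =====
-- stated objective: simpler
-- what changed: Replaces the preallocated list filled by a single position walker with step/sign arithmetic (position, step, v) by a parity partition of the sorted list into a left stack (evens, prepended) and a right list (odds, appended), concatenated at the end.
import Mathlib
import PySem

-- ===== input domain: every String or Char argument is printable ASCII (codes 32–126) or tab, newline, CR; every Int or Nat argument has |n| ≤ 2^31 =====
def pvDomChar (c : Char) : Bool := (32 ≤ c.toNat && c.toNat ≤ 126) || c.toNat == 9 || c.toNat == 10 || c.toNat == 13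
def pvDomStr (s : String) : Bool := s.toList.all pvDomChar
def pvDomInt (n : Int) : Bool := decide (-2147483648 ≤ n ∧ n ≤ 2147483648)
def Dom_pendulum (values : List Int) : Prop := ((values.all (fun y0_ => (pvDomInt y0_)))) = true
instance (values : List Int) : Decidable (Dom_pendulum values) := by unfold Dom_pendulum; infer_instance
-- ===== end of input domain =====

-- B replaces A's position/step/sign walking pass by a parity partition of the sorted list (simpler decomposition, same cost).

-- ===== PORT A =====
-- the for-loop of A: state (lst, position, step, v); Python's lst[position] = i is pySetD
-- (every write is in range on every reachable state, so no IndexError occurs)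
def pendLoop : List Int → List Int → Int → Int → Int → List Int
  | [], lst, _, _, _ => lst
  | i :: rest, lst, position, step, v =>
      let lst' := PySem.List.pySetD lst position i
      let position' := position + step
      let v' := v * (-1)
      let step' := v' * (abs step + 1)
      pendLoop rest lst' position' step' v'

def pendulum (values : List Int) : List Int :=
  -- Python builds lst = [None] * len(values); every slot is overwritten before the
  -- return on every input, so the placeholder (here 0) is never observed.
  let lst := List.replicate values.length (0 : Int)
  let values := PySem.List.sorted values (fun x => x) false
  let position : Int :=
    if (values.length : Int) % 2 = 1 then (values.length : Int) / 2
    else (values.length : Int) / 2 - 1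
  pendLoop values lst position 1 1

-- ===== PORT B =====
-- left[::-1] is ported as List.reverse (PySem.List.slice?_none_none_neg_one)
def pendulum_alt (values : List Int) : List Int :=
  let p := (PySem.List.enumerate (PySem.List.sorted values (fun x => x) false) 0).foldl
      (fun (lr : List Int × List Int) kx =>
        if kx.1 % 2 = 0 then (lr.1 ++ [kx.2], lr.2) else (lr.1, lr.2 ++ [kx.2]))
      ([], [])
  p.1.reverse ++ p.2

-- ===== PRECONDITION & SPEC =====
def Spec_pendulum (values : List Int) (out : List Int) : Prop := out = pendulum_alt values
instance (values : List Int) (out : List Int) : Decidable (Spec_pendulum values out) := by unfold Spec_pendulum; infer_instance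

-- ===== CLAIM (what is proved, stated in full; the proofs are below) =====
def Claim_equal_pendulum : Prop := ∀ (values : List Int), Dom_pendulum values → Spec_pendulum values (pendulum values)

-- ===== LEMMAS AND PROOFS =====

-- elements at even indices
def ev : List Int → List Int
  | [] => []
  | [x] => [x]
  | x :: _ :: rest => x :: ev rest

-- elements at odd indices
def od (xs : List Int) : List Int := ev xs.tail

theorem ev_cons (y : Int) (r : List Int) : ev (y :: r) = y :: od r := by
  cases r with
  | nil => rfl
  | cons z r' => rfl

theorem od_cons (y : Int) (r : List Int) : od (y :: r) = ev r := rfl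

theorem length_ev : ∀ (xs : List Int), (ev xs).length = (xs.length + 1) / 2
  | [] => rfl
  | [_] => by simp [ev]
  | _ :: _ :: rest => by
      simp [ev, length_ev rest]; omega

theorem set_replicate_last (e : Nat) (d x : Int) :
    (List.replicate (e + 1) d).set e x = List.replicate e d ++ [x] := by
  induction e with
  | zero => rfl
  | succ n ih =>
      rw [List.replicate_succ (n := n + 1), List.set_cons_succ, ih, List.replicate_succ]
      rfl

-- A's loop, characterized: starting centred with e = ⌈n/2⌉ empty slots left (incl. centre),
-- already-written M between the pointers, o = ⌊n/2⌋ empty slots right, it produces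
-- reverse (ev xs) ++ M ++ od xs.
theorem pendLoop_W : ∀ (xs M : List Int) (d : Int),
    pendLoop xs
      (List.replicate ((xs.length + 1) / 2) d ++ M ++ List.replicate (xs.length / 2) d)
      ((((xs.length + 1) / 2 : Nat) : Int) - 1) ((M.length : Int) + 1) 1
    = (ev xs).reverse ++ M ++ od xs
  | [], M, d => by simp [pendLoop, ev, od]
  | [x], M, d => by
      simp only [List.length_singleton]
      norm_num [pendLoop, ev, od]
      rw [show (0 : Int) = ((0 : Nat) : Int) from rfl, PySem.List.pySetD_natCast]
      simp
  | x :: y :: rest, M, d => by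
      have IH := pendLoop_W rest ([x] ++ M ++ [y]) d
      set n := rest.length with hn
      set e := (n + 1) / 2 with he
      set o := n / 2 with ho
      have hE : (x :: y :: rest).length = n + 2 := by simp [hn]
      rw [hE]
      have h1 : (n + 2 + 1) / 2 = e + 1 := by omega
      have h2 : (n + 2) / 2 = o + 1 := by omega
      rw [h1, h2]
      simp only [pendLoop]
      -- first write: position (e+1)-1 = e, last cell of the left replicate block
      have hp1 : ((((e + 1 : Nat)) : Int) - 1) = ((e : Nat) : Int) := by push_cast; ring
      rw [hp1, PySem.List.pySetD_natCast]
      have hw1 : (List.replicate (e + 1) d ++ M ++ List.replicate (o + 1) d).set e x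
          = (List.replicate e d ++ [x]) ++ M ++ List.replicate (o + 1) d := by
        rw [List.append_assoc, List.set_append_left _ _ (by simp), set_replicate_last]
        simp [List.append_assoc]
      rw [hw1]
      -- second write: position e + (M.length + 1), first cell of the right replicate block
      have hp2 : ((e : Nat) : Int) + ((M.length : Int) + 1) = (((e + 1 + M.length : Nat)) : Int) := by
        push_cast; ring
      rw [hp2, PySem.List.pySetD_natCast]
      have hlen : ((List.replicate e d ++ [x]) ++ M).length = e + 1 + M.length := by simp; omega
      have hw2 : ((List.replicate e d ++ [x]) ++ M ++ List.replicate (o + 1) d).set (e + 1 + M.length) y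
          = (List.replicate e d ++ [x]) ++ M ++ ([y] ++ List.replicate o d) := by
        rw [← List.append_assoc, List.set_append_right _ _ (by simp; omega), hlen,
          Nat.sub_self]
        simp [List.replicate_succ]
      rw [hw2]
      -- remaining state equals the IH instance with M' = [x] ++ M ++ [y]
      have habs1 : |(M.length : Int) + 1| = (M.length : Int) + 1 := abs_of_nonneg (by positivity)
      have habs2 : |(1 * -1) * ((M.length : Int) + 1 + 1)| = (M.length : Int) + 2 := by
        rw [abs_of_nonpos (by omega)]; ring
      rw [habs1]
      rw [habs2]
      have h3 : (((e + 1 + M.length : Nat)) : Int) + 1 * -1 * ((M.length : Int) + 1 + 1)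
          = ((e : Nat) : Int) - 1 := by push_cast; ring
      have h4 : (1 : Int) * -1 * -1 * ((M.length : Int) + 2 + 1)
          = (([x] ++ M ++ [y]).length : Int) + 1 := by simp; ring
      have h5 : (1 : Int) * -1 * -1 = 1 := by ring
      rw [h3, h4, h5]
      have h6 : (List.replicate e d ++ [x]) ++ M ++ ([y] ++ List.replicate o d)
          = List.replicate e d ++ ([x] ++ M ++ [y]) ++ List.replicate o d := by
        simp [List.append_assoc]
      rw [h6, IH]
      simp [ev, ev_cons, od]

-- B's fold, characterized.
theorem foldB (xs : List Int) : ∀ (k : Int) (L R : List Int),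
    (PySem.List.enumerate xs k).foldl
      (fun (lr : List Int × List Int) kx =>
        if kx.1 % 2 = 0 then (lr.1 ++ [kx.2], lr.2) else (lr.1, lr.2 ++ [kx.2]))
      (L, R)
    = if k % 2 = 0 then (L ++ ev xs, R ++ od xs)
      else (L ++ od xs, R ++ ev xs) := by
  induction xs with
  | nil => intro k L R; simp [PySem.List.enumerate_nil, ev, od]
  | cons x rest ih =>
      intro k L R
      rw [PySem.List.enumerate_cons]
      by_cases hk : k % 2 = 0
      · have d2 : ¬ (2 : Int) ∣ (k + 1) := by omega
        simp only [List.foldl_cons, ih (k + 1)]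
        simp [ev_cons, od_cons, hk, d2]
      · have d2 : (2 : Int) ∣ (k + 1) := by omega
        simp only [List.foldl_cons, ih (k + 1)]
        simp [ev_cons, od_cons, hk, d2]

theorem pendulum_eq (values : List Int) :
    pendulum values = (ev (PySem.List.sorted values (fun x => x) false)).reverse
      ++ od (PySem.List.sorted values (fun x => x) false) := by
  have hW := pendLoop_W (PySem.List.sorted values (fun x => x) false) [] 0
  unfold pendulum
  dsimp only
  set s := PySem.List.sorted values (fun x => x) false with hs
  rw [show values.length = s.length from (PySem.List.length_sorted values (fun x => x) false).symm]
  rw [show (if (s.length : Int) % 2 = 1 then (s.length : Int) / 2 else (s.length : Int) / 2 - 1)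
      = ((((s.length + 1) / 2 : Nat)) : Int) - 1 from by split_ifs <;> omega]
  rw [show List.replicate s.length (0 : Int)
      = List.replicate ((s.length + 1) / 2) (0 : Int) ++ [] ++ List.replicate (s.length / 2) (0 : Int)
      from by rw [List.append_nil, ← List.replicate_add]; congr 1; omega]
  simpa using hW

theorem pendulum_alt_eq (values : List Int) :
    pendulum_alt values = (ev (PySem.List.sorted values (fun x => x) false)).reverse
      ++ od (PySem.List.sorted values (fun x => x) false) := by
  unfold pendulum_alt
  rw [foldB (PySem.List.sorted values (fun x => x) false) 0 [] []]
  simp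

-- ===== VERDICT (by name: the statement is the Claim_ definition above) =====
theorem pendulum_spec : Claim_equal_pendulum := by
  intro values _
  unfold Spec_pendulum
  rw [pendulum_eq, pendulum_alt_eq]
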